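-- pv_equiv track=rewrite | github.com/VITAMIN-organisation/vitamin-model-checker | model_checker/parsers/game_structures/cgs/cgs_parser.py | extract_transition_rows
-- ===== SOURCE A (Python) =====
-- SECTION_HEADERS = frozenset(
--     {
--         "Transition",
--         "Unknown_Transition_by",
--         "Name_State",
--         "Initial_State",
--         "Atomic_propositions",
--         "Labelling",
--         "Number_of_agents",
--     }
-- )
--
-- def extract_transition_rows(lines, additional_transition_headers=None):
--     """Collect all lines that are transition rows (between Transition and the next section).
--
--     You can pass additional_transition_headers (e.g. {"Transition_With_Costs"}) so those
--     sections are treated as transition sections too.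
--     """
--     current_section = None
--     rows_graph = []
--     transition_headers = {"Transition"}
--     if additional_transition_headers:
--         transition_headers.update(additional_transition_headers)
--
--     for line in lines:
--         stripped = line.strip()
--
--         if not stripped or stripped.startswith("#") or stripped.startswith("//"):
--             continue
--
--         if stripped in transition_headers:
--             current_section = "Transition"
--         elif stripped in SECTION_HEADERS:
--             current_section = None
--         elif current_section == "Transition" and stripped:
--             rows_graph.append(stripped.split())
--
--     return rows_graph
-- ===== SOURCE B (Python) =====
-- SECTION_HEADERS = frozenset(
--     {
--         "Transition",
--         "Unknown_Transition_by",
--         "Name_State",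
--         "Initial_State",
--         "Atomic_propositions",
--         "Labelling",
--         "Number_of_agents",
--     }
-- )
--
--
-- def extract_transition_rows(lines, additional_transition_headers=None):
--     """Two-phase version: first keep only the significant (stripped, non-blank,
--     non-comment) lines, then walk them consuming whole transition blocks."""
--     transition = {"Transition"} | set(additional_transition_headers or ())
--     significant = [s for s in (line.strip() for line in lines)
--                    if s and not s.startswith("#") and not s.startswith("//")]
--     rows = []
--     i, n = 0, len(significant)
--     while i < n:
--         s = significant[i]
--         i += 1
--         if s in transition:
--             block = []
--             while i < n and significant[i] not in transition and significant[i] not in SECTION_HEADERS: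
--                 block.append(significant[i].split())
--                 i += 1
--             rows += block
--     return rows
-- ===== Notes on version B (the rewrite author's own statement) =====
-- stated objective: alternative
-- what changed: A's single-pass state machine carrying current_section is replaced by a two-phase decomposition: first filter the stripped significant lines, then a nested-loop walk that skips to each transition header and consumes its whole block of rows until the next header.
import Mathlib
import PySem

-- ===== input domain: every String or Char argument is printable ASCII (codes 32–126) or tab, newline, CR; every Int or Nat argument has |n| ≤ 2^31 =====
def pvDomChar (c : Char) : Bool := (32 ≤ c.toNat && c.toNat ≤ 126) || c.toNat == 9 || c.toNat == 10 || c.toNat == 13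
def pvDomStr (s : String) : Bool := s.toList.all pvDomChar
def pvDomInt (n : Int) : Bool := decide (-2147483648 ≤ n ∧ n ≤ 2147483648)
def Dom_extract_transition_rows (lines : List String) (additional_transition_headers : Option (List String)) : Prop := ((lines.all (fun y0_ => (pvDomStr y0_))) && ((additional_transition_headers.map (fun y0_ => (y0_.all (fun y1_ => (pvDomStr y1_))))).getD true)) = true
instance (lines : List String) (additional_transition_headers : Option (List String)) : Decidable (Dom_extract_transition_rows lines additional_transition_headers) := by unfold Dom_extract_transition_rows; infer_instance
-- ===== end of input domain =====

-- B replaces A's one-pass state machine by a two-phase decomposition (filter the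
-- significant lines first, then consume whole transition blocks); objective: alternative.

-- SECTION_HEADERS (module constant, shared by both versions)
def pvSectionHeaders : PySem.Set String :=
  PySem.Set.ofList ["Transition", "Unknown_Transition_by", "Name_State", "Initial_State",
                    "Atomic_propositions", "Labelling", "Number_of_agents"]

-- ===== PORT A =====
-- loop body of A's for-loop (line-by-line state machine over (current_section, rows_graph))
def pvStepA (th : PySem.Set String) (st : Option String × List (List String)) (line : String) :
    Option String × List (List String) :=
  let stripped := PySem.Str.strip line
  if stripped == "" || PySem.Str.startswith stripped "#" || PySem.Str.startswith stripped "//" then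
    st
  else if PySem.Set.contains th stripped then (some "Transition", st.2)
  else if PySem.Set.contains pvSectionHeaders stripped then (none, st.2)
  else if st.1 == some "Transition" && !(stripped == "") then (st.1, st.2 ++ [PySem.Str.split₀ stripped])
  else st

def extract_transition_rows (lines : List String) (additional_transition_headers : Option (List String)) : List (List String) :=
  let th : PySem.Set String :=
    match additional_transition_headers with
    | none => PySem.Set.ofList ["Transition"]
    | some l =>
        if l.isEmpty then PySem.Set.ofList ["Transition"]
        else PySem.Set.update (PySem.Set.ofList ["Transition"]) l
  (lines.foldl (pvStepA th) (none, [])).2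

-- ===== PORT B =====
-- keep condition of Source B's list comprehension: s and not s.startswith('#') and not s.startswith('//')
def pvKeep (s : String) : Bool :=
  !(s == "") && !(PySem.Str.startswith s "#") && !(PySem.Str.startswith s "//")

-- Source B's inner while: collect .split() rows until the next header (of either kind),
-- returning the rows of the block and the remaining suffix of significant lines
def pvBlock (th : PySem.Set String) : List String → List (List String) × List String
  | [] => ([], [])
  | s :: rest =>
      if PySem.Set.contains th s || PySem.Set.contains pvSectionHeaders s then ([], s :: rest)
      else
        let p := pvBlock th rest
        (PySem.Str.split₀ s :: p.1, p.2)

-- termination fact cited by pvScan's decreasing_by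
theorem pvBlock_snd_len (th : PySem.Set String) (l : List String) :
    (pvBlock th l).2.length ≤ l.length := by
  induction l with
  | nil => simp [pvBlock]
  | cons s rest ih =>
      simp only [pvBlock]
      split
      · simp
      · simpa using Nat.le_succ_of_le ih

-- Source B's outer while: skip to a transition header, consume its block, continue
def pvScan (th : PySem.Set String) : List String → List (List String)
  | [] => []
  | s :: rest =>
      if PySem.Set.contains th s then
        let p := pvBlock th rest
        p.1 ++ pvScan th p.2
      else pvScan th rest
termination_by l => l.length
decreasing_by
  · have h := pvBlock_snd_len th rest
    simp only [List.length_cons]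
    omega
  · simp

def extract_transition_rows_alt (lines : List String) (additional_transition_headers : Option (List String)) : List (List String) :=
  let th : PySem.Set String :=
    PySem.Set.union (PySem.Set.ofList ["Transition"]) (additional_transition_headers.getD [])
  let significant := (lines.map PySem.Str.strip).filter pvKeep
  pvScan th significant

-- ===== PRECONDITION & SPEC =====
def Spec_extract_transition_rows (lines : List String) (additional_transition_headers : Option (List String)) (out : List (List String)) : Prop := out = extract_transition_rows_alt lines additional_transition_headers
instance (lines : List String) (additional_transition_headers : Option (List String)) (out : List (List String)) : Decidable (Spec_extract_transition_rows lines additional_transition_headers out) := by unfold Spec_extract_transition_rows; infer_instance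

-- ===== CLAIM (what is proved, stated in full; the proofs are below) =====
def Claim_equal_extract_transition_rows : Prop := ∀ (lines : List String) (additional_transition_headers : Option (List String)), Dom_extract_transition_rows lines additional_transition_headers → Spec_extract_transition_rows lines additional_transition_headers (extract_transition_rows lines additional_transition_headers)

-- ===== LEMMAS AND PROOFS =====

-- dropWhile is idempotent
theorem pvDW_idem (p : Char → Bool) (l : List Char) :
    (l.dropWhile p).dropWhile p = l.dropWhile p := by
  induction l with
  | nil => simp
  | cons x xs ih =>
      by_cases h : p x
      · simp [h, ih]
      · simp [h]

-- a prefix of a left-stripped list is itself left-stripped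
theorem pvDW_of_prefix (p : Char → Bool) (n m : List Char)
    (hpre : n <+: m) (hm : m.dropWhile p = m) : n.dropWhile p = n := by
  cases n with
  | nil => simp
  | cons x t =>
      cases m with
      | nil => simp at hpre
      | cons y s =>
          have hxy : x = y := by
            rcases hpre with ⟨r, hr⟩
            simpa using congrArg List.head? hr
          have hy : p y = false := by
            by_cases h : p y
            · exfalso
              rw [List.dropWhile_cons, if_pos h] at hm
              have hlen := congrArg List.length hm
              have hle := List.length_dropWhile_le p s
              simp at hlen
              omega
            · exact Bool.eq_false_iff.mpr h
          rw [List.dropWhile_cons, hxy, hy]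
          simp

-- Python's str.strip is idempotent (char-list level)
theorem pvChstrip_idem (l : List Char) :
    PySem.Chars.strip (PySem.Chars.strip l) = PySem.Chars.strip l := by
  unfold PySem.Chars.strip PySem.Chars.rstrip PySem.Chars.lstrip
  have hm : (l.dropWhile PySem.Chars.isspace).dropWhile PySem.Chars.isspace
      = l.dropWhile PySem.Chars.isspace := pvDW_idem _ l
  have hpre : ((l.dropWhile PySem.Chars.isspace).reverse.dropWhile PySem.Chars.isspace).reverse
      <+: l.dropWhile PySem.Chars.isspace := by
    rw [← List.reverse_suffix]
    rw [List.reverse_reverse]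
    exact List.dropWhile_suffix _
  have h1 : (((l.dropWhile PySem.Chars.isspace).reverse.dropWhile PySem.Chars.isspace).reverse).dropWhile
      PySem.Chars.isspace
      = ((l.dropWhile PySem.Chars.isspace).reverse.dropWhile PySem.Chars.isspace).reverse :=
    pvDW_of_prefix _ _ _ hpre hm
  rw [h1, List.reverse_reverse, pvDW_idem]

-- Python's str.strip is idempotent (String level)
theorem pvStrip_idem (s : String) :
    PySem.Str.strip (PySem.Str.strip s) = PySem.Str.strip s := by
  simp only [PySem.Str.strip, String.toList_ofList]
  rw [pvChstrip_idem]

-- A's step on a line whose stripped form is kept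
theorem pvStepA_kept (th : PySem.Set String) (st : Option String × List (List String))
    (line : String) (hk : pvKeep (PySem.Str.strip line) = true) :
    pvStepA th st line =
      (if PySem.Set.contains th (PySem.Str.strip line) then (some "Transition", st.2)
       else if PySem.Set.contains pvSectionHeaders (PySem.Str.strip line) then (none, st.2)
       else if st.1 == some "Transition" then (st.1, st.2 ++ [PySem.Str.split₀ (PySem.Str.strip line)])
       else st) := by
  simp only [pvKeep, Bool.and_eq_true, Bool.not_eq_true'] at hk
  obtain ⟨⟨h0, h1⟩, h2⟩ := hk
  unfold pvStepA
  simp only [h0, h1, h2, Bool.or_self, Bool.false_eq_true, if_false, Bool.not_false, Bool.and_true]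

-- A's step on a line whose stripped form is skipped
theorem pvStepA_skip (th : PySem.Set String) (st : Option String × List (List String))
    (line : String) (hk : pvKeep (PySem.Str.strip line) = false) :
    pvStepA th st line = st := by
  have hc : (PySem.Str.strip line == "" || PySem.Str.startswith (PySem.Str.strip line) "#"
      || PySem.Str.startswith (PySem.Str.strip line) "//") = true := by
    revert hk
    unfold pvKeep
    cases PySem.Str.strip line == "" <;>
      cases PySem.Str.startswith (PySem.Str.strip line) "#" <;>
      cases PySem.Str.startswith (PySem.Str.strip line) "//" <;> simp
  unfold pvStepA
  simp only [hc, if_true]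

-- equation lemmas for the well-founded pvScan
theorem pvScan_nil (th : PySem.Set String) : pvScan th [] = [] := by
  rw [pvScan.eq_def]

theorem pvScan_cons (th : PySem.Set String) (s : String) (rest : List String) :
    pvScan th (s :: rest) =
      if PySem.Set.contains th s then (pvBlock th rest).1 ++ pvScan th (pvBlock th rest).2
      else pvScan th rest := by
  rw [pvScan.eq_def]

-- the two versions build the same transition-header set (Set.union s l = Set.update s l)
theorem pvTh_eq (add : Option (List String)) :
    (match add with
     | none => PySem.Set.ofList ["Transition"]
     | some l =>
         if l.isEmpty then PySem.Set.ofList ["Transition"]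
         else PySem.Set.update (PySem.Set.ofList ["Transition"]) l) =
    PySem.Set.union (PySem.Set.ofList ["Transition"]) (add.getD []) := by
  cases add with
  | none => rfl
  | some l => cases l with
    | nil => rfl
    | cons x xs => rfl

-- main invariant: over a list of kept, already-stripped lines, A's fold from each of its
-- two states produces exactly B's block/scan decomposition appended to the accumulator
theorem pvMain (th : PySem.Set String) (sig : List String)
    (h : ∀ s ∈ sig, PySem.Str.strip s = s ∧ pvKeep s = true) :
    (∀ acc, (sig.foldl (pvStepA th) (some "Transition", acc)).2
        = acc ++ (pvBlock th sig).1 ++ pvScan th (pvBlock th sig).2)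
    ∧ (∀ acc, (sig.foldl (pvStepA th) (none, acc)).2 = acc ++ pvScan th sig) := by
  induction sig with
  | nil => simp [pvBlock, pvScan_nil]
  | cons s rest ih =>
      have hs := (h s List.mem_cons_self).1
      have hk : pvKeep (PySem.Str.strip s) = true := by rw [hs]; exact (h s List.mem_cons_self).2
      have ih' := ih (fun x hx => h x (List.mem_cons_of_mem s hx))
      have hstep : ∀ st : Option String × List (List String),
          pvStepA th st s =
            (if PySem.Set.contains th s then (some "Transition", st.2)
             else if PySem.Set.contains pvSectionHeaders s then (none, st.2)
             else if st.1 == some "Transition" then (st.1, st.2 ++ [PySem.Str.split₀ s])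
             else st) := by
        intro st
        rw [pvStepA_kept th st s hk, hs]
      constructor
      · intro acc
        rw [List.foldl_cons, hstep]
        by_cases hth : PySem.Set.contains th s = true
        · rw [if_pos hth]
          have hb : pvBlock th (s :: rest) = ([], s :: rest) := by
            simp only [pvBlock]
            rw [if_pos (by rw [hth, Bool.true_or])]
          rw [hb, ih'.1 acc, pvScan_cons, if_pos hth]
          simp [List.append_assoc]
        · rw [if_neg hth]
          by_cases hsh : PySem.Set.contains pvSectionHeaders s = true
          · rw [if_pos hsh]
            have hb : pvBlock th (s :: rest) = ([], s :: rest) := by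
              simp only [pvBlock]
              rw [if_pos (by rw [hsh, Bool.or_true])]
            rw [hb, ih'.2 acc, pvScan_cons, if_neg hth]
            simp
          · rw [if_neg hsh]
            have hb : pvBlock th (s :: rest)
                = (PySem.Str.split₀ s :: (pvBlock th rest).1, (pvBlock th rest).2) := by
              simp only [pvBlock]
              rw [if_neg (by rw [Bool.eq_false_iff.mpr hth, Bool.eq_false_iff.mpr hsh]; simp)]
            rw [show ((some "Transition" : Option String) == some "Transition") = true from rfl,
              if_pos rfl, hb, ih'.1 (acc ++ [PySem.Str.split₀ s])]
            simp [List.append_assoc]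
      · intro acc
        rw [List.foldl_cons, hstep]
        by_cases hth : PySem.Set.contains th s = true
        · rw [if_pos hth, ih'.1 acc, pvScan_cons, if_pos hth]
          simp [List.append_assoc]
        · rw [if_neg hth]
          by_cases hsh : PySem.Set.contains pvSectionHeaders s = true
          · rw [if_pos hsh, ih'.2 acc, pvScan_cons, if_neg hth]
          · rw [if_neg hsh,
              show ((none : Option String) == some "Transition") = false from rfl]
            rw [if_neg (by simp), ih'.2 acc, pvScan_cons, if_neg hth]

-- A's fold over the raw lines equals the same fold over the filtered stripped lines
theorem pvFold_lines_eq (th : PySem.Set String) (lines : List String)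
    (init : Option String × List (List String)) :
    lines.foldl (pvStepA th) init
      = ((lines.map PySem.Str.strip).filter pvKeep).foldl (pvStepA th) init := by
  rw [List.foldl_filter, List.foldl_map]
  induction lines generalizing init with
  | nil => rfl
  | cons l rest ih =>
      simp only [List.foldl_cons]
      rw [← ih]
      congr 1
      by_cases hk : pvKeep (PySem.Str.strip l) = true
      · rw [if_pos hk, pvStepA_kept th init l hk,
          pvStepA_kept th init (PySem.Str.strip l) (by rwa [pvStrip_idem]), pvStrip_idem]
      · rw [if_neg hk, pvStepA_skip th init l (Bool.eq_false_iff.mpr hk)]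

-- ===== VERDICT (by name: the statement is the Claim_ definition above) =====
theorem extract_transition_rows_spec : Claim_equal_extract_transition_rows := by
  intro lines add _
  show extract_transition_rows lines add = extract_transition_rows_alt lines add
  simp only [extract_transition_rows, extract_transition_rows_alt]
  rw [pvTh_eq add, pvFold_lines_eq]
  have hsig : ∀ s ∈ (lines.map PySem.Str.strip).filter pvKeep,
      PySem.Str.strip s = s ∧ pvKeep s = true := by
    intro s hsmem
    have h1 := List.of_mem_filter hsmem
    have h2 := List.mem_of_mem_filter hsmem
    rcases List.mem_map.mp h2 with ⟨l, _, rfl⟩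
    exact ⟨pvStrip_idem l, h1⟩
  have hmain := (pvMain (PySem.Set.union (PySem.Set.ofList ["Transition"]) (add.getD []))
    ((lines.map PySem.Str.strip).filter pvKeep) hsig).2 []
  simpa using hmain
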